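-- pv_equiv track=rewrite | github.com/ckarrie/gruene-cms | gruene_cms/models.py | get_col_configs
-- ===== SOURCE A (Python) =====
-- def get_col_configs(default, col_config, news_items_count):
--     col_config_by_items = [default] * news_items_count
--     if col_config:
--         col_config_splitted = [int(x) for x in col_config.split(',')]
--         for i, x in enumerate(col_config_splitted):
--             try:
--                 col_config_by_items[i] = x
--             except IndexError:
--                 pass
--     return col_config_by_items
-- ===== SOURCE B (Python) =====
-- def get_col_configs(default, col_config, news_items_count):
--     values = iter([int(x) for x in col_config.split(',')]) if col_config else iter(())
--     return [next(values, default) for _ in range(news_items_count)]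
-- ===== Notes on version B (the rewrite author's own statement) =====
-- stated objective: simpler
-- what changed: Replaces the preallocate-then-mutate loop (index assignment under try/except IndexError) by a single-pass comprehension that consumes the parsed values through an iterator, emitting next(values, default) for each of the count positions; no list is preallocated or mutated.
import Mathlib
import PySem

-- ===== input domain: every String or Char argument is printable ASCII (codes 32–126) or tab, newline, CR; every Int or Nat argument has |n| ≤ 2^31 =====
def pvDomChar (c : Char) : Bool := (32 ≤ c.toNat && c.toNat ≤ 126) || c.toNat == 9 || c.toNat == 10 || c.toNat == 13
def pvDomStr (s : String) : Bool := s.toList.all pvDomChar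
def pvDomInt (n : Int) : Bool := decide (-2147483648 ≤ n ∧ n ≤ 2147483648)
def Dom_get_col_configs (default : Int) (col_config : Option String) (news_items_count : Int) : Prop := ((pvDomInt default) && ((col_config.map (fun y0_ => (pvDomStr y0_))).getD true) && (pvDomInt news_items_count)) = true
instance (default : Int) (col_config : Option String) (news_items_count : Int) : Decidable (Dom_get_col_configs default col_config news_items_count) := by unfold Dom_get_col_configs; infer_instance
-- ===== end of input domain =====

-- B replaces A's preallocate-then-mutate loop (index assignment under try/except IndexError) by a
-- single-pass comprehension consuming the parsed values through an iterator; objective: simpler.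


-- ===== PORT A =====
-- int(x) is ported totally as (ofChars? x).getD 0; Pre_ excludes the ValueError inputs, so the
-- default 0 is never observed on admitted inputs.
def get_col_configs (default : Int) (col_config : Option String) (news_items_count : Int) : List Int :=
  let base := PySem.List.pyRepeat [default] news_items_count
  match col_config with
  | none => base
  | some s =>
    if s = "" then base
    else
      let splitted := (PySem.Chars.splitOn s.toList [',']).map (fun x => (PySem.Int.ofChars? x).getD 0)
      -- for i, x in enumerate(...): try: base[i] = x except IndexError: pass
      -- pySetD is exactly "assign if in range, else leave unchanged"
      (PySem.List.enumerate splitted 0).foldl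
        (fun acc p => PySem.List.pySetD acc p.1 p.2) base

-- ===== PORT B =====
def get_col_configs_alt (default : Int) (col_config : Option String) (news_items_count : Int) : List Int :=
  let values :=
    match col_config with
    | none => []
    | some s =>
      if s = "" then []
      else (PySem.Chars.splitOn s.toList [',']).map (fun x => (PySem.Int.ofChars? x).getD 0)
  -- [next(values, default) for _ in range(n)]: the iterator state is the remaining list,
  -- next(values, default) takes the head when nonempty, default once exhausted
  ((PySem.List.pyRange 0 news_items_count 1).foldl
    (fun (st : List Int × List Int) _ =>
      match st.1 with
      | [] => ([], st.2 ++ [default])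
      | v :: vs => (vs, st.2 ++ [v]))
    (values, [])).2

-- ===== PRECONDITION & SPEC =====
-- Pre_ excludes exactly the inputs where Python's int(x) raises ValueError on a comma piece.
def Pre_get_col_configs (default : Int) (col_config : Option String) (news_items_count : Int) : Prop :=
  (match col_config with
   | none => true
   | some s => (s == "") || (PySem.Chars.splitOn s.toList [',']).all (fun x => (PySem.Int.ofChars? x).isSome)) = true

instance (default : Int) (col_config : Option String) (news_items_count : Int) : Decidable (Pre_get_col_configs default col_config news_items_count) := by
  unfold Pre_get_col_configs; infer_instance

def pvWitness_get_col_configs : Int × Option String × Int := (3, some "1, 2", 4)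

def Spec_get_col_configs (default : Int) (col_config : Option String) (news_items_count : Int) (out : List Int) : Prop := out = get_col_configs_alt default col_config news_items_count
instance (default : Int) (col_config : Option String) (news_items_count : Int) (out : List Int) : Decidable (Spec_get_col_configs default col_config news_items_count out) := by unfold Spec_get_col_configs; infer_instance

-- ===== CLAIM (what is proved, stated in full; the proofs are below) =====
def Claim_equal_get_col_configs : Prop := ∀ (default : Int) (col_config : Option String) (news_items_count : Int), Dom_get_col_configs default col_config news_items_count → Pre_get_col_configs default col_config news_items_count → Spec_get_col_configs default col_config news_items_count (get_col_configs default col_config news_items_count)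

-- ===== LEMMAS AND PROOFS =====

-- setting at indices ≥ acc.length never changes acc
theorem pv_setloop_oob (xs : List Int) (s : Nat) (acc : List Int) (h : acc.length ≤ s) :
    (PySem.List.enumerate xs (s : Int)).foldl (fun acc p => PySem.List.pySetD acc p.1 p.2) acc = acc := by
  induction xs generalizing s with
  | nil => simp [PySem.List.enumerate_nil]
  | cons x xs ih =>
    rw [PySem.List.enumerate_cons]
    simp only [List.foldl_cons, PySem.List.pySetD_natCast,
      List.set_eq_of_length_le h]
    have : ((s : Int) + 1) = ((s + 1 : Nat) : Int) := by push_cast; ring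
    rw [this, ih (s + 1) (by omega)]

-- the per-index assignment loop on pre ++ [d]*m is trim-then-pad of the tail
theorem pv_setloop (xs : List Int) (m : Nat) (d : Int) (pre : List Int) :
    (PySem.List.enumerate xs (pre.length : Int)).foldl (fun acc p => PySem.List.pySetD acc p.1 p.2)
        (pre ++ List.replicate m d)
      = pre ++ xs.take m ++ List.replicate (m - xs.length) d := by
  induction xs generalizing m pre with
  | nil => simp [PySem.List.enumerate_nil]
  | cons x xs ih =>
    rw [PySem.List.enumerate_cons]
    cases m with
    | zero =>
      simp only [List.replicate_zero, List.append_nil, List.foldl_cons,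
        PySem.List.pySetD_natCast, List.set_eq_of_length_le (le_refl _)]
      have : ((pre.length : Int) + 1) = ((pre.length + 1 : Nat) : Int) := by push_cast; ring
      rw [this, pv_setloop_oob xs (pre.length + 1) pre (by omega)]
      simp
    | succ m =>
      simp only [List.replicate_succ, List.foldl_cons, PySem.List.pySetD_natCast]
      have hset : (pre ++ d :: List.replicate m d).set pre.length x
          = (pre ++ [x]) ++ List.replicate m d := by
        rw [List.set_append_right _ _ (le_refl _)]
        simp
      rw [hset]
      have hlen : ((pre.length : Int) + 1) = (((pre ++ [x]).length : Nat) : Int) := by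
        simp
      rw [hlen, ih m (pre ++ [x])]
      simp [List.take_succ_cons, Nat.succ_sub_succ]

theorem pv_setloop_zero (xs : List Int) (m : Nat) (d : Int) :
    (PySem.List.enumerate xs (0 : Int)).foldl (fun acc p => PySem.List.pySetD acc p.1 p.2)
        (List.replicate m d)
      = xs.take m ++ List.replicate (m - xs.length) d := by
  have := pv_setloop xs m d []
  simpa using this

-- B's iterator-consuming fold characterised: over any driver list of length m it appends
-- take m of the remaining values then pads with the default for the exhausted steps
theorem pv_foldB_eq {α : Type} (l : List α) (vs acc : List Int) (d : Int) :
    (l.foldl (fun (st : List Int × List Int) _ =>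
        match st.1 with
        | [] => ([], st.2 ++ [d])
        | v :: vs => (vs, st.2 ++ [v])) (vs, acc)).2
      = acc ++ vs.take l.length ++ List.replicate (l.length - vs.length) d := by
  induction l generalizing vs acc with
  | nil => simp
  | cons _ t ih =>
    cases vs with
    | nil =>
      simp only [List.foldl_cons]
      rw [ih]
      simp [List.replicate_succ]
    | cons v vs =>
      simp only [List.foldl_cons]
      rw [ih]
      simp [List.take_succ_cons, Nat.succ_sub_succ]

-- ===== VERDICT (by name: the statement is the Claim_ definition above) =====
theorem get_col_configs_spec : Claim_equal_get_col_configs := by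
  intro d cc n _ _
  unfold Spec_get_col_configs get_col_configs get_col_configs_alt
  have hlen : (PySem.List.pyRange 0 n 1).length = n.toNat := by
    rw [PySem.List.length_pyRange_one]; omega
  match cc with
  | none =>
    simp only [PySem.List.pyRepeat_singleton]
    rw [pv_foldB_eq, hlen]
    simp
  | some s =>
    by_cases hs : s = ""
    · simp only [hs, if_pos rfl, PySem.List.pyRepeat_singleton]
      rw [pv_foldB_eq, hlen]
      simp
    · simp only [if_neg hs, PySem.List.pyRepeat_singleton]
      rw [pv_setloop_zero _ n.toNat d, pv_foldB_eq, hlen]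
      simp
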